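-- pv_equiv track=rewrite | github.com/rajibbardhan007/certin-sbom-tool | backup/certin_enricher.py | determine_patch_status
-- ===== SOURCE A (Python) =====
-- from typing import Dict, List, Any
--
-- def determine_patch_status(vulnerabilities: List[Dict]) -> str:
--     """Determine patch status based on vulnerabilities"""
--     if not vulnerabilities:
--         return "No known vulnerabilities"
--
--     # Check if any vulnerabilities have fixes available
--     has_fixes = any(vuln.get('fixed_versions') for vuln in vulnerabilities)
--     if has_fixes:
--         return "Patch available"
--
--     # Check for high severity vulnerabilities
--     high_severity = any(vuln.get('severity') in ['Critical', 'High'] for vuln in vulnerabilities)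
--     if high_severity:
--         return "Requires immediate attention"
--
--     return "Under investigation"
-- ===== SOURCE B (Python) =====
-- def determine_patch_status(vulnerabilities):
--     """Determine patch status based on vulnerabilities (single-pass version)."""
--     if not vulnerabilities:
--         return "No known vulnerabilities"
--     high_severity = False
--     for vuln in vulnerabilities:
--         if vuln.get('fixed_versions'):
--             return "Patch available"
--         if vuln.get('severity') in ('Critical', 'High'):
--             high_severity = True
--     return "Requires immediate attention" if high_severity else "Under investigation"
-- ===== Notes on version B (the rewrite author's own statement) =====
-- stated objective: alternative
-- what changed: Replaces the two separate full any() scans with a single early-exit loop that returns 'Patch available' on the first truthy fixed_versions and accumulates a high-severity flag along the way.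
import Mathlib
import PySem

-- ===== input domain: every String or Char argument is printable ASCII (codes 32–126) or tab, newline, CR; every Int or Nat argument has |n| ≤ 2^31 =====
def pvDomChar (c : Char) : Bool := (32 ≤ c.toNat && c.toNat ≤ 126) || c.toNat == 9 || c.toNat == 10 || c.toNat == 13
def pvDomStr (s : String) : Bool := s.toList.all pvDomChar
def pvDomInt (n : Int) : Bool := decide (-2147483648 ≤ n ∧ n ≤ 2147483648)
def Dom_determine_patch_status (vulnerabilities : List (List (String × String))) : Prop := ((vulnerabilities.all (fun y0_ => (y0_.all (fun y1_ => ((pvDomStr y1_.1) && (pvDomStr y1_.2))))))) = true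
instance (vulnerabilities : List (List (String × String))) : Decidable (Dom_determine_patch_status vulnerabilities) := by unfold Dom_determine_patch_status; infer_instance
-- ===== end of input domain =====

-- B fuses A's two separate any() scans into one early-exit loop with an accumulated high-severity flag; same return value everywhere.


-- ===== PORT A =====
-- vuln.get('fixed_versions') is truthy iff the key is present with a non-empty string (missing → None, falsy)
def pvHasFix (vuln : List (String × String)) : Bool :=
  (PySem.Dict.getD (PySem.Dict.ofList vuln) "fixed_versions" "") ≠ ""

-- vuln.get('severity') in ['Critical', 'High']  (None never matches)
def pvHighSev (vuln : List (String × String)) : Bool :=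
  PySem.Dict.get? (PySem.Dict.ofList vuln) "severity" == some "Critical" ||
  PySem.Dict.get? (PySem.Dict.ofList vuln) "severity" == some "High"

def determine_patch_status (vulnerabilities : List (List (String × String))) : String :=
  if vulnerabilities = [] then "No known vulnerabilities"
  else
    let has_fixes := vulnerabilities.any pvHasFix
    if has_fixes then "Patch available"
    else
      let high_severity := vulnerabilities.any pvHighSev
      if high_severity then "Requires immediate attention"
      else "Under investigation"

-- ===== PORT B =====
-- single loop: early return on a fix, accumulate the high-severity flag
def determine_patch_status_alt_loop : List (List (String × String)) → Bool → String
  | [], high => if high then "Requires immediate attention" else "Under investigation"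
  | v :: rest, high =>
    if pvHasFix v then "Patch available"
    else determine_patch_status_alt_loop rest (high || pvHighSev v)

def determine_patch_status_alt (vulnerabilities : List (List (String × String))) : String :=
  if vulnerabilities = [] then "No known vulnerabilities"
  else determine_patch_status_alt_loop vulnerabilities false

-- ===== PRECONDITION & SPEC =====
def Spec_determine_patch_status (vulnerabilities : List (List (String × String))) (out : String) : Prop := out = determine_patch_status_alt vulnerabilities
instance (vulnerabilities : List (List (String × String))) (out : String) : Decidable (Spec_determine_patch_status vulnerabilities out) := by unfold Spec_determine_patch_status; infer_instance

-- ===== CLAIM (what is proved, stated in full; the proofs are below) =====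
def Claim_equal_determine_patch_status : Prop := ∀ (vulnerabilities : List (List (String × String))), Dom_determine_patch_status vulnerabilities → Spec_determine_patch_status vulnerabilities (determine_patch_status vulnerabilities)

-- ===== LEMMAS AND PROOFS =====
-- the loop's characterisation: fixes have priority, the flag accumulates the severity scan
theorem alt_loop_eq (l : List (List (String × String))) (high : Bool) :
    determine_patch_status_alt_loop l high =
      if l.any pvHasFix then "Patch available"
      else if high || l.any pvHighSev then "Requires immediate attention"
      else "Under investigation" := by
  induction l generalizing high with
  | nil => simp [determine_patch_status_alt_loop]
  | cons v rest ih =>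
    simp only [determine_patch_status_alt_loop, List.any_cons]
    by_cases h : pvHasFix v = true
    · simp [h]
    · simp only [Bool.not_eq_true] at h
      simp [h, ih, Bool.or_assoc]

-- ===== VERDICT (by name: the statement is the Claim_ definition above) =====
theorem determine_patch_status_spec : Claim_equal_determine_patch_status := by
  intro vulns _
  unfold Spec_determine_patch_status determine_patch_status determine_patch_status_alt
  by_cases hnil : vulns = []
  · simp [hnil]
  · simp [hnil, alt_loop_eq]
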